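-- pv_equiv track=rewrite | github.com/trarck/repack | cpp_garbage_code.py | get_source_last_impl_position
-- ===== SOURCE A (Python) =====
-- def get_source_last_impl_position(class_name, lines):
--     find_position = -1
--     line_index = 0
--     impl = "%s::" % class_name
--     for line in lines:
--         if line.find(impl):
--             find_position = line_index
--         line_index += 1
--     return find_position
-- ===== SOURCE B (Python) =====
-- def get_source_last_impl_position(class_name, lines):
--     lst = list(lines)
--     impl = "%s::" % class_name
--     for i in range(len(lst) - 1, -1, -1):
--         if lst[i].find(impl) != 0:
--             return i
--     return -1
-- ===== Notes on version B (the rewrite author's own statement) =====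
-- stated objective: faster
-- what changed: B materializes the lines and scans backwards from the last index, returning at the first (i.e. last) line whose find(impl) is nonzero, instead of A's forward pass over every line that overwrites a last-match accumulator.
import Mathlib
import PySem

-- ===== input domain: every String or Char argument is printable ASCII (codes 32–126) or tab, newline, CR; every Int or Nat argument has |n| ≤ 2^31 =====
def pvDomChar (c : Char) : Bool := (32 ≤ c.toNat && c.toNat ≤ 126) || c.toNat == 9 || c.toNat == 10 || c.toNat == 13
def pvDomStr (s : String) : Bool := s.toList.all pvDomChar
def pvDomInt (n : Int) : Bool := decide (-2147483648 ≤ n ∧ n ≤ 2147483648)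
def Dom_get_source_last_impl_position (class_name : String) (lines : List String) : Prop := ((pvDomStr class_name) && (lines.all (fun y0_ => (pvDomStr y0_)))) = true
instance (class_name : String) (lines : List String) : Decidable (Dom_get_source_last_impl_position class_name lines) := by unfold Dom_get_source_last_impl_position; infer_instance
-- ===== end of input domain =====

-- B scans the lines backwards with early exit; A overwrites a last-match accumulator in a forward pass (alternative decomposition, same worst-case cost).

-- ===== PORT A =====
def get_source_last_impl_position (class_name : String) (lines : List String) : Int :=
  let impl := class_name ++ "::"
  let st := lines.foldl
    (fun (st : Int × Int) line =>
      (if PySem.Str.find line impl ≠ 0 then st.2 else st.1, st.2 + 1))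
    (-1, 0)
  st.1

-- ===== PORT B =====
-- reverse scan: examine lines.reverse, carrying the current index i (starting at length-1)
def pvRevScan (impl : String) : List String → Nat → Int
  | [], _ => -1
  | l :: ls, i => if PySem.Str.find l impl ≠ 0 then (i : Int) else pvRevScan impl ls (i - 1)

def get_source_last_impl_position_alt (class_name : String) (lines : List String) : Int :=
  let impl := class_name ++ "::"
  pvRevScan impl lines.reverse (lines.length - 1)

-- ===== PRECONDITION & SPEC =====
def Spec_get_source_last_impl_position (class_name : String) (lines : List String) (out : Int) : Prop := out = get_source_last_impl_position_alt class_name lines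
instance (class_name : String) (lines : List String) (out : Int) : Decidable (Spec_get_source_last_impl_position class_name lines out) := by unfold Spec_get_source_last_impl_position; infer_instance

-- ===== CLAIM (what is proved, stated in full; the proofs are below) =====
def Claim_equal_get_source_last_impl_position : Prop := ∀ (class_name : String) (lines : List String), Dom_get_source_last_impl_position class_name lines → Spec_get_source_last_impl_position class_name lines (get_source_last_impl_position class_name lines)

-- ===== LEMMAS AND PROOFS =====

theorem pv_foldl_snd (impl : String) (ls : List String) (st : Int × Int) :
    (ls.foldl (fun (st : Int × Int) line =>
      (if PySem.Str.find line impl ≠ 0 then st.2 else st.1, st.2 + 1)) st).2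
      = st.2 + ls.length := by
  induction ls generalizing st with
  | nil => simp
  | cons l ls ih => rw [List.foldl_cons, ih]; simp; omega

theorem pv_main (impl : String) (ls : List String) :
    (ls.foldl (fun (st : Int × Int) line =>
      (if PySem.Str.find line impl ≠ 0 then st.2 else st.1, st.2 + 1)) (-1, 0)).1
      = pvRevScan impl ls.reverse (ls.length - 1) := by
  induction ls using List.reverseRecOn with
  | nil => simp [pvRevScan]
  | append_singleton ls x ih =>
    rw [List.foldl_append]
    simp only [List.foldl, List.reverse_append, List.reverse_singleton,
      List.singleton_append, List.length_append, List.length_singleton]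
    have hsnd := pv_foldl_snd impl ls ((-1 : Int), 0)
    simp at ih hsnd
    by_cases h : PySem.Chars.find x.toList impl.toList = 0
    · simpa [pvRevScan, h] using ih
    · simpa [pvRevScan, h] using hsnd

-- ===== VERDICT (by name: the statement is the Claim_ definition above) =====
theorem get_source_last_impl_position_spec : Claim_equal_get_source_last_impl_position := by
  intro class_name lines _
  unfold Spec_get_source_last_impl_position get_source_last_impl_position get_source_last_impl_position_alt
  exact pv_main _ lines
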